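-- pv_equiv track=rewrite | github.com/FabienLamonarca/daily-interview | src/daily_itw/longest_substring_without_repetitions.py | length_of_longest_substring_linear
-- ===== SOURCE A (Python) =====
-- def length_of_longest_substring_linear(s):
--     max_size = 0
--     curr_size = 0
--     last_c = ""
--
--     for c in s:
--
--         if c == last_c:
--             curr_size = 0
--
--         curr_size = curr_size + 1
--         last_c = c
--
--         if curr_size > max_size:
--             max_size = curr_size
--
--     return max_size
-- ===== SOURCE B (Python) =====
-- def length_of_longest_substring_linear(s):
--     # Collect boundary indices where an adjacent repetition starts, then take the longest gap.
--     bounds = [0]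
--     i = 1
--     for prev, cur in zip(s, s[1:]):
--         if prev == cur:
--             bounds.append(i)
--         i += 1
--     bounds.append(len(s))
--     best = 0
--     for a, b in zip(bounds, bounds[1:]):
--         if b - a > best:
--             best = b - a
--     return best
-- ===== Notes on version B (the rewrite author's own statement) =====
-- stated objective: alternative
-- what changed: Replaces the running-counter single pass with a two-phase decomposition: first collect the boundary indices where an adjacent repetition starts (via zip of the string with its shift), then return the maximum gap between consecutive boundaries.
import Mathlib
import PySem

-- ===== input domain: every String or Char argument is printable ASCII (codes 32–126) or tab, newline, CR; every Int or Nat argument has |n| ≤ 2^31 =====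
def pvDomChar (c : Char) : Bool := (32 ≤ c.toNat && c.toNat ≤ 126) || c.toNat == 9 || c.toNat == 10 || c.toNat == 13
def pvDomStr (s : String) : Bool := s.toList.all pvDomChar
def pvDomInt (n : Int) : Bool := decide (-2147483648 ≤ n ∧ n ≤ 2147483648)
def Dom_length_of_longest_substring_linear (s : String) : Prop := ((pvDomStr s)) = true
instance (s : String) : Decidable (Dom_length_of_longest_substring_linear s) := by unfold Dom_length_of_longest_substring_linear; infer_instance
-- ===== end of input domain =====

-- B replaces A's running-counter pass by collecting repetition-boundary indices and taking the
-- longest gap between consecutive boundaries (alternative decomposition, same O(n) cost).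

-- ===== PORT A =====
-- last_c starts as "" and then holds a one-character string; both are represented as List Char.
def length_of_longest_substring_linear (s : String) : Int :=
  (s.toList.foldl
    (fun (st : Int × Int × List Char) c =>
      let curr := (if [c] = st.2.2 then 0 else st.2.1) + 1
      (if curr > st.1 then curr else st.1, curr, [c]))
    (0, 0, ([] : List Char))).1

-- ===== PORT B =====
def length_of_longest_substring_linear_alt (s : String) : Int :=
  let l := s.toList
  let st := (l.zip (PySem.List.slice l (some 1) none)).foldl
      (fun (st : List Int × Int) pc =>
        ((if pc.1 = pc.2 then st.1 ++ [st.2] else st.1), st.2 + 1)) ([0], 1)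
  let bounds := st.1 ++ [(l.length : Int)]
  (bounds.zip (PySem.List.slice bounds (some 1) none)).foldl
      (fun best ab => if ab.2 - ab.1 > best then ab.2 - ab.1 else best) 0

-- ===== PRECONDITION & SPEC =====
def Spec_length_of_longest_substring_linear (s : String) (out : Int) : Prop := out = length_of_longest_substring_linear_alt s
instance (s : String) (out : Int) : Decidable (Spec_length_of_longest_substring_linear s out) := by unfold Spec_length_of_longest_substring_linear; infer_instance

-- ===== CLAIM (what is proved, stated in full; the proofs are below) =====
def Claim_equal_length_of_longest_substring_linear : Prop := ∀ (s : String), Dom_length_of_longest_substring_linear s → Spec_length_of_longest_substring_linear s (length_of_longest_substring_linear s)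

-- ===== LEMMAS AND PROOFS =====

-- A's loop as a function of an arbitrary start state.
def pvAf (st : Int × Int × List Char) (l : List Char) : Int × Int × List Char :=
  l.foldl
    (fun (st : Int × Int × List Char) c =>
      let curr := (if [c] = st.2.2 then 0 else st.2.1) + 1
      (if curr > st.1 then curr else st.1, curr, [c])) st

-- B's boundary-collecting loop as a function of an arbitrary start state.
def pvZf (st : List Int × Int) (ps : List (Char × Char)) : List Int × Int :=
  ps.foldl (fun (st : List Int × Int) pc =>
    ((if pc.1 = pc.2 then st.1 ++ [st.2] else st.1), st.2 + 1)) st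

-- B's max-gap loop, as structural recursion on the boundary list.
def pvMf : Int → List Int → Int
  | acc, x :: y :: rest => pvMf (if y - x > acc then y - x else acc) (y :: rest)
  | acc, _ => acc

-- last element of x :: l
def pvLast (x : Int) : List Int → Int
  | [] => x
  | y :: t => pvLast y t

theorem pvAf_cons (st : Int × Int × List Char) (c : Char) (l : List Char) :
    pvAf st (c :: l)
      = pvAf (let curr := (if [c] = st.2.2 then 0 else st.2.1) + 1;
              (if curr > st.1 then curr else st.1, curr, [c])) l := rfl

theorem pvMf_eq_fold (bs : List Int) (acc : Int) :
    (bs.zip bs.tail).foldl (fun best ab => if ab.2 - ab.1 > best then ab.2 - ab.1 else best) acc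
      = pvMf acc bs := by
  induction bs generalizing acc with
  | nil => simp [pvMf]
  | cons x t ih =>
      cases t with
      | nil => simp [pvMf]
      | cons y rest =>
          simp only [List.tail_cons, List.zip_cons_cons, List.foldl_cons]
          have := ih (if y - x > acc then y - x else acc)
          simp only [List.tail_cons] at this
          rw [this]
          simp [pvMf]

theorem pvA_eq (s : String) :
    length_of_longest_substring_linear s = (pvAf (0, 0, []) s.toList).1 := rfl

theorem pvB_eq (s : String) :
    length_of_longest_substring_linear_alt s
      = pvMf 0 ((pvZf ([0], 1) (s.toList.zip s.toList.tail)).1 ++ [(s.toList.length : Int)]) := by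
  simp [length_of_longest_substring_linear_alt, pvZf, ← pvMf_eq_fold,
    PySem.List.slice_from_one]

theorem pvLast_concat (bs : List Int) (x j : Int) : pvLast x (bs ++ [j]) = j := by
  induction bs generalizing x with
  | nil => rfl
  | cons y t ih => simpa [pvLast] using ih y

theorem pvMf_concat (bs : List Int) (x j acc : Int) :
    pvMf acc (x :: (bs ++ [j])) = max (pvMf acc (x :: bs)) (j - pvLast x bs) := by
  induction bs generalizing x acc with
  | nil =>
      simp only [List.nil_append, pvMf, pvLast]
      rw [max_def]; split_ifs <;> omega
  | cons y t ih =>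
      simp only [List.cons_append]
      rw [show pvMf acc (x :: y :: (t ++ [j]))
            = pvMf (if y - x > acc then y - x else acc) (y :: (t ++ [j])) from by simp [pvMf]]
      rw [ih y (if y - x > acc then y - x else acc)]
      rw [show pvMf acc (x :: y :: t)
            = pvMf (if y - x > acc then y - x else acc) (y :: t) from by simp [pvMf]]
      rfl

-- Main invariant: A has consumed a nonempty prefix whose last character is `last`; B's boundary
-- loop still has the pairs of `last :: t` to process, with counter `i` and boundaries `x :: bs`;
-- A's curr equals the distance to the last boundary and A's max equals the best gap so far.
theorem pvMain (t : List Char) (last : Char) (bs : List Int) (x m k i : Int)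
    (hk : k = i - pvLast x bs)
    (hm : m = pvMf 0 (x :: (bs ++ [i]))) :
    (pvAf (m, k, [last]) t).1
      = pvMf 0 ((pvZf (x :: bs, i) ((last :: t).zip t)).1 ++ [i + t.length]) := by
  induction t generalizing last bs x m k i with
  | nil =>
      simpa [pvAf, pvZf] using hm
  | cons c t' ih =>
      by_cases h : c = last
      · -- repetition boundary at index i
        have hlc : last = c := h.symm
        have hc1 : ([c] = [last]) = True := by simp [h]
        have hA : pvAf (m, k, [last]) (c :: t')
            = pvAf ((if (1 : Int) > m then 1 else m), 1, [c]) t' := by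
          rw [pvAf_cons]
          simp only [hc1, if_true, zero_add]
        have hZ : pvZf (x :: bs, i) ((last :: c :: t').zip (c :: t'))
            = pvZf (x :: (bs ++ [i]), i + 1) ((c :: t').zip t') := by
          simp [pvZf, hlc]
        have hk' : (1 : Int) = (i + 1) - pvLast x (bs ++ [i]) := by
          rw [pvLast_concat]; omega
        have hm' : (if (1 : Int) > m then 1 else m) = pvMf 0 (x :: ((bs ++ [i]) ++ [i + 1])) := by
          rw [pvMf_concat (bs ++ [i]) x (i + 1) 0, pvLast_concat, ← hm]
          rw [max_def]; split_ifs <;> omega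
        have hrec := ih c (bs ++ [i]) x (if (1 : Int) > m then 1 else m) 1 (i + 1) hk' hm'
        have hlen : i + 1 + (t'.length : Int) = i + (((c :: t').length : Nat) : Int) := by
          push_cast [List.length_cons]; ring
        rw [hA, hZ, hrec, hlen]
      · -- no boundary
        have hlc : ¬ (last = c) := fun e => h e.symm
        have hc0 : ([c] = [last]) = False := by simp [h]
        have hA : pvAf (m, k, [last]) (c :: t')
            = pvAf ((if k + 1 > m then k + 1 else m), k + 1, [c]) t' := by
          rw [pvAf_cons]
          simp only [hc0, if_false]
        have hZ : pvZf (x :: bs, i) ((last :: c :: t').zip (c :: t'))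
            = pvZf (x :: bs, i + 1) ((c :: t').zip t') := by
          simp [pvZf, hlc]
        have hk' : k + 1 = (i + 1) - pvLast x bs := by omega
        have hm' : (if k + 1 > m then k + 1 else m) = pvMf 0 (x :: (bs ++ [i + 1]))  := by
          have e2 := pvMf_concat bs x i 0
          rw [e2] at hm
          rw [pvMf_concat bs x (i + 1) 0]
          rw [max_def] at hm ⊢; split_ifs at hm ⊢ <;> omega
        have hrec := ih c bs x (if k + 1 > m then k + 1 else m) (k + 1) (i + 1) hk' hm'
        have hlen : i + 1 + (t'.length : Int) = i + (((c :: t').length : Nat) : Int) := by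
          push_cast [List.length_cons]; ring
        rw [hA, hZ, hrec, hlen]

theorem pvList_eq (l : List Char) :
    (pvAf (0, 0, []) l).1
      = pvMf 0 ((pvZf ([0], 1) (l.zip l.tail)).1 ++ [(l.length : Int)]) := by
  cases l with
  | nil => simp [pvAf, pvZf, pvMf]
  | cons c t =>
      have hstep : pvAf (0, 0, []) (c :: t) = pvAf (1, 1, [c]) t := by
        rw [pvAf_cons]; simp
      have hmain := pvMain t c [] 0 1 1 1 (by simp [pvLast]) (by decide)
      have hn : (1 : Int) + (t.length : Int) = (((c :: t).length : Nat) : Int) := by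
        push_cast [List.length_cons]; ring
      rw [hstep, List.tail_cons, hmain, hn]

-- ===== VERDICT (by name: the statement is the Claim_ definition above) =====
theorem length_of_longest_substring_linear_spec : Claim_equal_length_of_longest_substring_linear := by
  intro s _
  unfold Spec_length_of_longest_substring_linear
  rw [pvA_eq, pvB_eq, pvList_eq]
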